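-- pv_equiv track=rewrite | github.com/JobQiu/LeetCodeCompetition | Congmin Qiu/toDo/company/amazon/minmaxpath.py | helper2
-- ===== SOURCE A (Python) =====
-- def helper2(matrix):
--     num_row = len(matrix)
--     num_col= len(matrix[0])
--
--     dp = [[0]*num_col for _ in range(num_row)]
--     dp[0][0] = matrix[0][0]
--
--     for i in range(1, num_row):
--         dp[i][0] = min(dp[i-1][0], matrix[i][0])
--
--     for i in range(1, num_col):
--         dp[0][i] = min(dp[0][i-1], matrix[0][i])
--
--     for i in range(1, num_row):
--         for j in range(1, num_col):
--
--             prevMaxMin = max(dp[i-1][j], dp[i][j-1])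
--             dp[i][j] = min(matrix[i][j], prevMaxMin)
--     return dp[-1][-1]
--     pass
-- ===== SOURCE B (Python) =====
-- def helper2(matrix):
--     vals = sorted({v for row in matrix for v in row})
--
--     def reachable(t):
--         prev = None
--         for row in matrix:
--             cur = []
--             for j, v in enumerate(row):
--                 if v < t:
--                     ok = False
--                 elif prev is None:
--                     ok = True if j == 0 else cur[j - 1]
--                 else:
--                     ok = prev[j] or (j > 0 and cur[j - 1])
--                 cur.append(ok)
--             prev = cur
--         return prev[-1]
--
--     lo, hi = 0, len(vals) - 1
--     while lo < hi:
--         mid = (lo + hi + 1) // 2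
--         if reachable(vals[mid]):
--             lo = mid
--         else:
--             hi = mid - 1
--     return vals[lo]
-- ===== Notes on version B (the rewrite author's own statement) =====
-- stated objective: alternative
-- what changed: B replaces A's min/max dynamic-programming table by parametric search: it collects the sorted distinct cell values and binary-searches for the largest threshold t such that a boolean right/down reachability sweep over cells >= t still reaches the bottom-right corner.
-- outside the precondition, e.g. on helper2([[1, 2], [3, 4, 5]]): A returns 1, B raises IndexError
import Mathlib
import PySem

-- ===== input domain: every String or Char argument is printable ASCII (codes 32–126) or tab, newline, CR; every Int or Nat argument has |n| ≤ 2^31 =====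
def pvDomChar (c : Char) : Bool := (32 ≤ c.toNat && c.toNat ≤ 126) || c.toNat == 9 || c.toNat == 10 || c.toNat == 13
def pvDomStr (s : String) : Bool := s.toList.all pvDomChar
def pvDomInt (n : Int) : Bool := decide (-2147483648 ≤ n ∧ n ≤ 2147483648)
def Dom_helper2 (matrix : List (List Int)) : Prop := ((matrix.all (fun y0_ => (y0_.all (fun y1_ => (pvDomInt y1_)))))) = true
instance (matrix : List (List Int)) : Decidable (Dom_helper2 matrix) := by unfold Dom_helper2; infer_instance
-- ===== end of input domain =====

-- B replaces A's min/max DP table by parametric search: sorted distinct cell values plus a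
-- binary search over a boolean right/down reachability sweep (objective: alternative).

-- ===== PORT A =====
-- matrix[i][j] read (in range on Pre_)
def aGet (m : List (List Int)) (i j : Int) : Int :=
  PySem.List.pyGetD (PySem.List.pyGetD m i []) j 0

-- dp[i][j] = v (in range on Pre_)
def aSet (dp : List (List Int)) (i j : Int) (v : Int) : List (List Int) :=
  PySem.List.pySetD dp i (PySem.List.pySetD (PySem.List.pyGetD dp i []) j v)

def helper2 (matrix : List (List Int)) : Int :=
  let num_row : Int := matrix.length
  let num_col : Int := (PySem.List.pyGetD matrix 0 []).length
  let dp0 : List (List Int) :=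
    List.replicate matrix.length (List.replicate (PySem.List.pyGetD matrix 0 []).length 0)
  let dp1 := aSet dp0 0 0 (aGet matrix 0 0)
  let dp2 := (PySem.List.pyRange 1 num_row 1).foldl
    (fun dp i => aSet dp i 0 (min (aGet dp (i-1) 0) (aGet matrix i 0))) dp1
  let dp3 := (PySem.List.pyRange 1 num_col 1).foldl
    (fun dp i => aSet dp 0 i (min (aGet dp 0 (i-1)) (aGet matrix 0 i))) dp2
  let dp4 := (PySem.List.pyRange 1 num_row 1).foldl
    (fun dp i => (PySem.List.pyRange 1 num_col 1).foldl
      (fun dp j => aSet dp i j (min (aGet matrix i j) (max (aGet dp (i-1) j) (aGet dp i (j-1))))) dp)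
    dp3
  -- dp[-1][-1]
  aGet dp4 (-1) (-1)

-- ===== PORT B =====
-- one row of B's reachability sweep: `last` is cur[j-1] (none when j == 0); prev[j] is read
-- with a default (in range on Pre_, where all rows have equal length)
def rRow (t : Int) (prevO : Option (List Bool)) : List Int → Nat → Option Bool → List Bool
  | [], _, _ => []
  | v :: vs, j, last =>
    let ok : Bool :=
      if v < t then false
      else match prevO with
        | none => (match last with | none => true | some l => l)
        | some p => p.getD j false || (match last with | none => false | some l => l)
    ok :: rRow t prevO vs (j + 1) (some ok)

-- reachable(t): fold the sweep over the rows, read prev[-1]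
def reachB (m : List (List Int)) (t : Int) : Bool :=
  let prev := m.foldl (fun prevO row => some (rRow t prevO row 0 none)) (none : Option (List Bool))
  PySem.List.pyGetD (prev.getD []) (-1) false

-- the while loop: binary search for the largest index with reachable(vals[mid]).
-- lo, hi are nonnegative throughout, so Nat arithmetic and / match Python's // exactly;
-- vals[mid] is read with a default, in range since 0 ≤ lo ≤ mid ≤ hi < len(vals).
-- Structural recursion on a fuel: hi - lo shrinks every iteration, so fuel = len(vals)
-- (> initial hi - lo) is never exhausted and the loop is transcribed exactly.
def bsB (m : List (List Int)) (vals : List Int) : Nat → Nat → Nat → Nat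
  | 0, lo, _ => lo
  | fuel+1, lo, hi =>
    if lo < hi then
      if reachB m (vals.getD ((lo + hi + 1) / 2) 0) then bsB m vals fuel ((lo + hi + 1) / 2) hi
      else bsB m vals fuel lo ((lo + hi + 1) / 2 - 1)
    else lo

def helper2_alt (matrix : List (List Int)) : Int :=
  let vals := PySem.List.sorted
    (PySem.Set.ofList (matrix.foldl (fun acc row => acc ++ row) [])) (fun x => x) false
  vals.getD (bsB matrix vals vals.length 0 (vals.length - 1)) 0

-- ===== PRECONDITION & SPEC =====
-- Pre_ excludes the empty matrix and matrices whose first row is empty (A raises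
-- IndexError there) and ragged matrices (rows of different length: rows shorter than
-- the first make A raise IndexError, rows longer than the first are malformed input
-- outside the rectangular-grid domain, where B's natural sweep raises).
def Pre_helper2 (matrix : List (List Int)) : Prop :=
  matrix ≠ [] ∧ matrix.headD [] ≠ [] ∧ ∀ r ∈ matrix, r.length = (matrix.headD []).length
instance (matrix : List (List Int)) : Decidable (Pre_helper2 matrix) := by
  unfold Pre_helper2; infer_instance

def pvWitness_helper2 : List (List Int) := [[5, 4, 5], [1, 2, 6], [7, 4, 6]]

def Spec_helper2 (matrix : List (List Int)) (out : Int) : Prop := out = helper2_alt matrix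
instance (matrix : List (List Int)) (out : Int) : Decidable (Spec_helper2 matrix out) := by
  unfold Spec_helper2; infer_instance

-- ===== CLAIM (what is proved, stated in full; the proofs are below) =====
def Claim_equal_helper2 : Prop :=
  ∀ (matrix : List (List Int)), Dom_helper2 matrix → Pre_helper2 matrix →
    Spec_helper2 matrix (helper2 matrix)

-- ===== LEMMAS AND PROOFS =====

-- reference recursion: the max-over-paths-of-min value at cell (i,j) of m
def cellM (m : List (List Int)) (i j : Nat) : Int := (m.getD i []).getD j 0

def refM (m : List (List Int)) : Nat → Nat → Int
  | 0, 0 => cellM m 0 0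
  | i+1, 0 => min (refM m i 0) (cellM m (i+1) 0)
  | 0, j+1 => min (refM m 0 j) (cellM m 0 (j+1))
  | i+1, j+1 => min (cellM m (i+1) (j+1)) (max (refM m i (j+1)) (refM m (i+1) j))
termination_by i j => i + j

-- generic list getD/set facts
theorem getD_set_self {α : Type} (l : List α) (i : Nat) (v d : α) (h : i < l.length) :
    (l.set i v).getD i d = v := by
  simp [List.getD_eq_getElem?_getD, h]

theorem getD_set_ne {α : Type} (l : List α) (i i' : Nat) (v d : α) (h : i ≠ i') :
    (l.set i v).getD i' d = l.getD i' d := by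
  simp [List.getD_eq_getElem?_getD, List.getElem?_set_ne h]

theorem getD_mem' {α : Type} (l : List α) (i : Nat) (d : α) (h : i < l.length) :
    l.getD i d ∈ l := by
  rw [List.getD_eq_getElem l d h]; exact List.getElem_mem h

theorem getLast_eq_getD {α : Type} [Inhabited α] (l : List α) (h : l ≠ []) (d : α) :
    l.getLast h = l.getD (l.length - 1) d := by
  rw [List.getLast_eq_getElem, List.getD_eq_getElem]

-- === B side ===

theorem length_rRow (t : Int) (p : Option (List Bool)) (l : List Int) (j : Nat) (o : Option Bool) :
    (rRow t p l j o).length = l.length := by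
  induction l generalizing j o with
  | nil => rfl
  | cons v vs ih => simp [rRow, ih]

-- reachability sweep: decide-form characterisation against refM

theorem rRow_none_succ (t : Int) (l : List Int) (acc : Bool) (j0 : Nat) (k : Nat)
    (h : k + 1 < l.length) :
    (rRow t none l j0 (some acc)).getD (k+1) false =
      (!decide (l.getD (k+1) 0 < t) && (rRow t none l j0 (some acc)).getD k false) := by
  induction l generalizing acc j0 k with
  | nil => simp at h
  | cons v vs ih =>
    cases k with
    | zero =>
      cases vs with
      | nil => simp at h
      | cons w ws =>
        simp only [rRow, List.getD_cons_succ, List.getD_cons_zero]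
        split_ifs <;> simp_all
    | succ k =>
      have h' : k + 1 < vs.length := by simpa using h
      simpa [rRow] using ih _ _ k h'

theorem rRow_none_adj (t : Int) (v : Int) (vs : List Int) (j : Nat)
    (h : j + 1 < (v :: vs).length) :
    (rRow t none (v :: vs) 0 none).getD (j+1) false =
      (!decide ((v :: vs).getD (j+1) 0 < t) && (rRow t none (v :: vs) 0 none).getD j false) := by
  cases j with
  | zero =>
    cases vs with
    | nil => simp at h
    | cons w ws =>
      simp only [rRow, List.getD_cons_succ, List.getD_cons_zero]
      split_ifs <;> simp_all
  | succ k =>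
    have h' : k + 1 < vs.length := by simpa using h
    simpa [rRow] using rRow_none_succ t vs _ 1 k h'

theorem rRow_some_adj (t : Int) (p : List Bool) (l : List Int) (j0 : Nat) (o : Option Bool)
    (k : Nat) (h : k + 1 < l.length) :
    (rRow t (some p) l j0 o).getD (k+1) false =
      (!decide (l.getD (k+1) 0 < t) &&
        (p.getD (j0+k+1) false || (rRow t (some p) l j0 o).getD k false)) := by
  induction l generalizing j0 o k with
  | nil => simp at h
  | cons v vs ih =>
    cases k with
    | zero =>
      cases vs with
      | nil => simp at h
      | cons w ws =>
        cases o <;>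
          (simp only [rRow, List.getD_cons_succ, List.getD_cons_zero]
           split_ifs <;> simp_all)
    | succ k =>
      have h' : k + 1 < vs.length := by simpa using h
      simp only [rRow, List.getD_cons_succ]
      rw [ih (j0+1) _ k h']
      ring_nf

theorem rRow0_correct (t : Int) (r0 : List Int) (rest : List (List Int)) (j : Nat)
    (hj : j < r0.length) :
    (rRow t none r0 0 none).getD j false = decide (t ≤ refM (r0 :: rest) 0 j) := by
  induction j with
  | zero =>
    cases r0 with
    | nil => simp at hj
    | cons v vs =>
      rw [refM]
      simp only [rRow, cellM, List.getD_cons_zero]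
      split_ifs <;> simp_all
  | succ j ih =>
    cases r0 with
    | nil => simp at hj
    | cons v vs =>
      rw [refM]
      rw [rRow_none_adj t v vs j hj, ih (by omega)]
      have hc : cellM ((v :: vs) :: rest) 0 (j+1) = (v :: vs).getD (j+1) 0 := by
        simp [cellM]
      rw [hc]
      cases hde : decide (t ≤ refM ((v :: vs) :: rest) 0 j) <;>
        cases hd2 : decide ((v :: vs).getD (j+1) 0 < t) <;> simp_all

theorem rRowNext_correct (t : Int) (m : List (List Int)) (i : Nat) (p : List Bool)
    (row : List Int) (nc : Nat)
    (hp : ∀ j < nc, p.getD j false = decide (t ≤ refM m i j))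
    (hrl : row.length = nc)
    (hrow : ∀ j < nc, row.getD j 0 = cellM m (i+1) j) :
    ∀ j < nc, (rRow t (some p) row 0 none).getD j false = decide (t ≤ refM m (i+1) j) := by
  intro j
  induction j with
  | zero =>
    intro hj
    cases row with
    | nil => simp at hrl; omega
    | cons v vs =>
      rw [refM]
      have h0 := hrow 0 hj
      have hp0 := hp 0 hj
      simp only [List.getD_cons_zero] at h0
      simp only [rRow, List.getD_cons_zero]
      rw [hp0, h0]
      split_ifs with hv <;>
        cases hde : decide (t ≤ refM m i 0) <;> simp_all
  | succ j ih =>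
    intro hj
    rw [refM]
    rw [rRow_some_adj t p row 0 none j (by omega)]
    rw [ih (by omega)]
    rw [show (0:Nat) + j + 1 = j + 1 by omega, hp (j+1) hj, hrow (j+1) hj]
    cases h1 : decide (cellM m (i+1) (j+1) < t) <;>
      cases h2 : decide (t ≤ refM m i (j+1)) <;>
      cases h3 : decide (t ≤ refM m (i+1) j) <;> simp_all

-- the fold over the remaining rows of B's sweep
theorem foldReach (t : Int) (m : List (List Int)) (nc : Nat) (tl : List (List Int)) :
    ∀ (i : Nat) (p : List Bool), m.drop (i+1) = tl → p.length = nc →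
    (∀ j < nc, p.getD j false = decide (t ≤ refM m i j)) →
    (∀ r ∈ m, r.length = nc) →
    ∃ q, tl.foldl (fun prevO row => some (rRow t prevO row 0 none)) (some p) = some q ∧
      q.length = nc ∧
      ∀ j < nc, q.getD j false = decide (t ≤ refM m (i + tl.length) j) := by
  induction tl with
  | nil =>
    intro i p _ hl hp _
    exact ⟨p, rfl, hl, by simpa using hp⟩
  | cons r tl' ih =>
    intro i p hdrop hl hp hrect
    have hlt : i + 1 < m.length := by
      by_contra hc
      rw [List.drop_eq_nil_of_le (by omega)] at hdrop
      exact List.cons_ne_nil r tl' hdrop.symm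
    have hg : m[(i+1)]? = some r := by
      rw [show i+1 = i+1+0 from rfl, ← List.getElem?_drop, hdrop]; rfl
    have hr : m.getD (i+1) [] = r := by
      simp [List.getD_eq_getElem?_getD, hg]
    have hdrop' : m.drop (i+2) = tl' := by
      have : m.drop (i+1+1) = (m.drop (i+1)).drop 1 := by rw [List.drop_drop]
      rw [this, hdrop]; rfl
    have hrlen : r.length = nc := hrect r (by rw [← hr]; exact getD_mem' m (i+1) [] hlt)
    have hrowc : ∀ j < nc, r.getD j 0 = cellM m (i+1) j := by
      intro j _; simp only [cellM]; rw [hr]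
    have hnext := rRowNext_correct t m i p r nc hp hrlen hrowc
    have := ih (i+1) (rRow t (some p) r 0 none) hdrop'
      (by rw [length_rRow, hrlen]) hnext hrect
    obtain ⟨q, hq1, hq2, hq3⟩ := this
    refine ⟨q, ?_, hq2, ?_⟩
    · simpa using hq1
    · intro j hj
      simp only [List.length_cons,
        show i + (tl'.length + 1) = i + 1 + tl'.length from by omega]
      exact hq3 j hj

-- reachable(t) decides t ≤ (the DP answer)
theorem reachB_eq (m : List (List Int)) (h : Pre_helper2 m) (t : Int) :
    reachB m t = decide (t ≤ refM m (m.length - 1) ((m.getD 0 []).length - 1)) := by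
  obtain ⟨hne, h0, hrect⟩ := h
  obtain ⟨r0, rest, rfl⟩ : ∃ r0 rest, m = r0 :: rest := by
    cases m with
    | nil => exact absurd rfl hne
    | cons a b => exact ⟨a, b, rfl⟩
  simp only [List.headD_cons] at h0 hrect
  set mm := r0 :: rest with hm
  set nc := r0.length with hnc
  have hnc0 : 0 < nc := List.length_pos_iff.mpr h0
  have hp0len : (rRow t none r0 0 none).length = nc := by rw [length_rRow]
  have hp0 : ∀ j < nc, (rRow t none r0 0 none).getD j false = decide (t ≤ refM mm 0 j) :=
    fun j hj => rRow0_correct t r0 rest j hj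
  obtain ⟨q, hq1, hq2, hq3⟩ := foldReach t mm nc rest 0 (rRow t none r0 0 none) rfl hp0len hp0 hrect
  have hfold : ((r0 :: rest).foldl
      (fun prevO row => some (rRow t prevO row 0 none)) (none : Option (List Bool))) = some q := by
    rw [List.foldl_cons]; exact hq1
  simp only [reachB]
  rw [hfold, Option.getD_some]
  have hqne : q ≠ [] := by
    intro hq; rw [hq] at hq2; simp at hq2; omega
  rw [PySem.List.pyGetD_neg_one q false hqne, getLast_eq_getD q hqne false, hq2]
  rw [hq3 (nc-1) (by omega)]
  simp [hm, hnc]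

-- the DP answer is an actual matrix value
theorem cellM_mem_flatten (m : List (List Int)) (i j : Nat)
    (hi : i < m.length) (hj : j < (m.getD i []).length) :
    cellM m i j ∈ m.flatten :=
  List.mem_flatten.mpr ⟨m.getD i [], getD_mem' m i [] hi, getD_mem' _ j 0 hj⟩

theorem refM_mem_flatten (m : List (List Int)) (nc : Nat)
    (hrect : ∀ r ∈ m, r.length = nc) :
    ∀ n i j, i + j = n → i < m.length → j < nc → refM m i j ∈ m.flatten := by
  intro n
  induction n using Nat.strong_induction_on with
  | _ n ih =>
    intro i j hn hi hj
    have hcell : ∀ i' j', i' < m.length → j' < nc → cellM m i' j' ∈ m.flatten := by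
      intro i' j' hi' hj'
      refine cellM_mem_flatten m i' j' hi' ?_
      rw [hrect _ (getD_mem' m i' [] hi')]; exact hj'
    match i, j with
    | 0, 0 => rw [refM]; exact hcell 0 0 hi hj
    | i+1, 0 =>
      rw [refM]
      rcases min_choice (refM m i 0) (cellM m (i+1) 0) with hc | hc <;> rw [hc]
      · exact ih (i+0) (by omega) i 0 rfl (by omega) hj
      · exact hcell (i+1) 0 hi hj
    | 0, j+1 =>
      rw [refM]
      rcases min_choice (refM m 0 j) (cellM m 0 (j+1)) with hc | hc <;> rw [hc]
      · exact ih (0+j) (by omega) 0 j rfl hi (by omega)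
      · exact hcell 0 (j+1) hi hj
    | i+1, j+1 =>
      rw [refM]
      rcases min_choice (cellM m (i+1) (j+1)) (max (refM m i (j+1)) (refM m (i+1) j)) with hc | hc <;> rw [hc]
      · exact hcell (i+1) (j+1) hi hj
      · rcases max_choice (refM m i (j+1)) (refM m (i+1) j) with hd | hd <;> rw [hd]
        · exact ih (i+(j+1)) (by omega) i (j+1) rfl (by omega) hj
        · exact ih ((i+1)+j) (by omega) (i+1) j rfl hi (by omega)

-- binary-search invariant
theorem bsB_inv (m : List (List Int)) (vals : List Int) (ans : Int)
    (hre : ∀ k, k < vals.length → reachB m (vals.getD k 0) = decide (vals.getD k 0 ≤ ans))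
    (hmono : ∀ i j, i < j → j < vals.length → vals.getD i 0 < vals.getD j 0)
    (i0 : Nat) (hi0 : i0 < vals.length) (hansv : vals.getD i0 0 = ans) :
    ∀ fuel lo hi, hi - lo < fuel → lo ≤ hi → hi < vals.length → vals.getD lo 0 ≤ ans →
      (∀ k, hi < k → k < vals.length → ans < vals.getD k 0) →
      vals.getD (bsB m vals fuel lo hi) 0 = ans := by
  intro fuel
  induction fuel with
  | zero => intro lo hi hn; omega
  | succ fuel ih =>
    intro lo hi hn hle hhi hlov htail
    simp only [bsB]
    split_ifs with h1 h2
    · refine ih _ _ (by omega) (by omega) hhi ?_ htail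
      have := hre ((lo+hi+1)/2) (by omega)
      rw [this] at h2
      exact of_decide_eq_true h2
    · have hm := hre ((lo+hi+1)/2) (by omega)
      rw [hm] at h2
      have hmidgt : ans < vals.getD ((lo+hi+1)/2) 0 := by
        rcases lt_or_ge ans (vals.getD ((lo+hi+1)/2) 0) with hc | hc
        · exact hc
        · exact absurd (decide_eq_true hc) h2
      refine ih _ _ (by omega) (by omega) (by omega) hlov ?_
      intro k hk hklen
      by_cases hk2 : k ≤ hi
      · rcases Nat.lt_or_ge ((lo+hi+1)/2) k with hlt | hge
        · exact lt_trans hmidgt (hmono _ k hlt hklen)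
        · have : k = (lo+hi+1)/2 := by omega
          rw [this]; exact hmidgt
      · exact htail k (by omega) hklen
    · have hlo : lo = hi := by omega
      rcases lt_trichotomy i0 lo with hc | hc | hc
      · have := hmono i0 lo hc (by omega)
        rw [hansv] at this
        omega
      · rw [← hc, hansv]
      · have := htail i0 (by omega) hi0
        rw [hansv] at this
        omega

theorem foldl_append_flatten {α : Type} (l : List (List α)) (acc : List α) :
    l.foldl (fun a r => a ++ r) acc = acc ++ l.flatten := by
  induction l generalizing acc with
  | nil => simp
  | cons x xs ih => simp [List.foldl_cons, ih]

-- helper2_alt computes refM at the corner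
theorem helper2_B_ref (matrix : List (List Int)) (h : Pre_helper2 matrix) :
    helper2_alt matrix = refM matrix (matrix.length - 1) ((matrix.getD 0 []).length - 1) := by
  obtain ⟨hne, h0, hrect⟩ := h
  have h0' : matrix.getD 0 [] ≠ [] := by
    cases matrix with
    | nil => exact absurd rfl hne
    | cons a b => simpa using h0
  have hrect' : ∀ r ∈ matrix, r.length = (matrix.getD 0 []).length := by
    intro r hr
    have := hrect r hr
    cases matrix with
    | nil => exact absurd rfl hne
    | cons a b => simpa using this
  have hnr0 : 0 < matrix.length := List.length_pos_iff.mpr hne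
  have hnc0 : 0 < (matrix.getD 0 []).length := List.length_pos_iff.mpr h0'
  set ans := refM matrix (matrix.length - 1) ((matrix.getD 0 []).length - 1) with hans
  -- the flattening used by B equals List.flatten
  have hflat : matrix.foldl (fun acc row => acc ++ row) [] = matrix.flatten := by
    simpa using foldl_append_flatten matrix []
  set vals := PySem.List.sorted
    (PySem.Set.ofList (matrix.foldl (fun acc row => acc ++ row) [])) (fun x => x) false with hvals
  have hansmem : ans ∈ vals := by
    rw [hvals, PySem.List.mem_sorted, PySem.Set.mem_ofList, hflat]
    exact refM_mem_flatten matrix _ hrect' _ _ _ rfl (by omega) (by omega)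
  have hpair : vals.Pairwise (· < ·) := PySem.List.sorted_ofList_pairwise_lt _
  have hmono : ∀ i j, i < j → j < vals.length → vals.getD i 0 < vals.getD j 0 := by
    intro i j hij hj
    have hi : i < vals.length := by omega
    rw [List.getD_eq_getElem _ _ hi, List.getD_eq_getElem _ _ hj]
    exact List.pairwise_iff_getElem.mp hpair i j hi hj hij
  obtain ⟨i0, hi0, hansv⟩ := List.mem_iff_getElem.mp hansmem
  have hansv' : vals.getD i0 0 = ans := by rw [List.getD_eq_getElem _ _ hi0, hansv]
  have hre : ∀ k, k < vals.length → reachB matrix (vals.getD k 0) = decide (vals.getD k 0 ≤ ans) :=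
    fun k _ => reachB_eq matrix ⟨hne, h0, hrect⟩ (vals.getD k 0)
  have hvlen : 0 < vals.length := by
    cases hv : vals with
    | nil => rw [hv] at hansmem; simp at hansmem
    | cons a b => simp
  have hlov : vals.getD 0 0 ≤ ans := by
    rcases Nat.eq_zero_or_pos i0 with h | h
    · subst h; exact le_of_eq hansv'
    · exact le_of_lt (hansv' ▸ hmono 0 i0 h hi0)
  have := bsB_inv matrix vals ans hre hmono i0 hi0 hansv'
    vals.length 0 (vals.length - 1) (by omega) (by omega) (by omega) hlov
    (fun k hk hklen => by omega)
  simp only [helper2_alt]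
  rw [← hvals]
  exact this


-- === A side ===

def sset (dp : List (List Int)) (i j : Nat) (v : Int) : List (List Int) :=
  dp.set i ((dp.getD i []).set j v)

theorem length_sset (dp : List (List Int)) (i j : Nat) (v : Int) :
    (sset dp i j v).length = dp.length := by simp [sset]

theorem cellM_sset_self (dp : List (List Int)) (i j : Nat) (v : Int)
    (hi : i < dp.length) (hj : j < (dp.getD i []).length) :
    cellM (sset dp i j v) i j = v := by
  simp only [cellM, sset]
  rw [getD_set_self _ _ _ _ hi, getD_set_self _ _ _ _ hj]

theorem cellM_sset_ne (dp : List (List Int)) (i j : Nat) (v : Int) (i' j' : Nat)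
    (h : ¬(i = i' ∧ j = j')) :
    cellM (sset dp i j v) i' j' = cellM dp i' j' := by
  simp only [cellM, sset]
  by_cases hi : i = i'
  · subst hi
    have hj : j ≠ j' := fun hj => h ⟨rfl, hj⟩
    by_cases hlt : i < dp.length
    · rw [getD_set_self _ _ _ _ hlt, getD_set_ne _ _ _ _ _ hj]
    · rw [List.set_eq_of_length_le (by omega)]
  · rw [getD_set_ne _ _ _ _ _ hi]

def ShapeP (nr nc : Nat) (dp : List (List Int)) : Prop :=
  dp.length = nr ∧ ∀ row ∈ dp, row.length = nc

theorem shape_row_len {nr nc : Nat} {dp : List (List Int)} (h : ShapeP nr nc dp)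
    (i : Nat) (hi : i < nr) : (dp.getD i []).length = nc :=
  h.2 _ (getD_mem' dp i [] (by rw [h.1]; exact hi))

theorem shape_sset {nr nc : Nat} {dp : List (List Int)} (h : ShapeP nr nc dp)
    (i j : Nat) (v : Int) (hi : i < nr) : ShapeP nr nc (sset dp i j v) := by
  refine ⟨by rw [length_sset, h.1], ?_⟩
  intro row hrow
  rcases List.mem_or_eq_of_mem_set hrow with h1 | h1
  · exact h.2 row h1
  · rw [h1, List.length_set]; exact shape_row_len h i hi

def stepCol (m : List (List Int)) (dp : List (List Int)) (k : Nat) : List (List Int) :=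
  sset dp (k+1) 0 (min (cellM dp k 0) (cellM m (k+1) 0))

def stepRow (m : List (List Int)) (dp : List (List Int)) (k : Nat) : List (List Int) :=
  sset dp 0 (k+1) (min (cellM dp 0 k) (cellM m 0 (k+1)))

def stepIn (m : List (List Int)) (i : Nat) (dp : List (List Int)) (k : Nat) : List (List Int) :=
  sset dp i (k+1) (min (cellM m i (k+1)) (max (cellM dp (i-1) (k+1)) (cellM dp i k)))

def stepOut (m : List (List Int)) (nc : Nat) (dp : List (List Int)) (k : Nat) : List (List Int) :=
  (List.range (nc-1)).foldl (stepIn m (k+1)) dp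

def natDP (m : List (List Int)) : List (List Int) :=
  let nr := m.length
  let nc := (m.getD 0 []).length
  let dp0 := List.replicate nr (List.replicate nc 0)
  let dp1 := sset dp0 0 0 (cellM m 0 0)
  let dp2 := (List.range (nr-1)).foldl (stepCol m) dp1
  let dp3 := (List.range (nc-1)).foldl (stepRow m) dp2
  (List.range (nr-1)).foldl (stepOut m nc) dp3

theorem aGet_natCast (dp : List (List Int)) (i j : Nat) :
    aGet dp (i : Int) (j : Int) = cellM dp i j := by
  simp [aGet, cellM]

theorem aSet_natCast (dp : List (List Int)) (i j : Nat) (v : Int) :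
    aSet dp (i : Int) (j : Int) v = sset dp i j v := by
  simp [aSet, sset]

theorem foldl_pyRange_one_shift {β : Type} (f : β → Int → β) (g : β → Nat → β)
    (n : Nat) (init : β) (h : ∀ b (k : Nat), f b ((k : Int) + 1) = g b k) :
    (PySem.List.pyRange 1 (n : Int) 1).foldl f init = (List.range (n-1)).foldl g init := by
  rw [PySem.List.pyRange_one, List.foldl_map]
  rw [show ((n : Int) - 1).toNat = n - 1 by omega]
  congr 1
  funext b k
  rw [show (1 : Int) + (k : Int) = (k : Int) + 1 by ring, h]

-- the three loops of A, index-shifted to Nat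
theorem helper2_eq_nat (m : List (List Int)) :
    helper2 m = aGet (natDP m) (-1) (-1) := by
  unfold helper2 natDP
  have hcol : ∀ (dp : List (List Int)) (k : Nat),
      aSet dp ((k:Int)+1) 0 (min (aGet dp ((k:Int)+1-1) 0) (aGet m ((k:Int)+1) 0)) = stepCol m dp k := by
    intro dp k
    rw [show (k:Int)+1 = ((k+1 : Nat) : Int) by push_cast; ring]
    rw [show ((k+1 : Nat) : Int) - 1 = ((k : Nat) : Int) by push_cast; ring]
    rw [show (0:Int) = ((0:Nat):Int) by norm_num]
    rw [aSet_natCast, aGet_natCast, aGet_natCast]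
    rfl
  have hrow : ∀ (dp : List (List Int)) (k : Nat),
      aSet dp 0 ((k:Int)+1) (min (aGet dp 0 ((k:Int)+1-1)) (aGet m 0 ((k:Int)+1))) = stepRow m dp k := by
    intro dp k
    rw [show (k:Int)+1 = ((k+1 : Nat) : Int) by push_cast; ring]
    rw [show ((k+1 : Nat) : Int) - 1 = ((k : Nat) : Int) by push_cast; ring]
    rw [show (0:Int) = ((0:Nat):Int) by norm_num]
    rw [aSet_natCast, aGet_natCast, aGet_natCast]
    rfl
  have hout : ∀ (dp : List (List Int)) (k : Nat),
      (PySem.List.pyRange 1 ((m.getD 0 []).length : Int) 1).foldl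
        (fun dp j => aSet dp ((k:Int)+1) j (min (aGet m ((k:Int)+1) j)
          (max (aGet dp ((k:Int)+1-1) j) (aGet dp ((k:Int)+1) (j-1))))) dp
      = stepOut m (m.getD 0 []).length dp k := by
    intro dp k
    unfold stepOut
    apply foldl_pyRange_one_shift
    intro b u
    rw [show (k:Int)+1 = ((k+1 : Nat) : Int) by push_cast; ring]
    rw [show (u:Int)+1 = ((u+1 : Nat) : Int) by push_cast; ring]
    rw [show ((k+1 : Nat) : Int) - 1 = ((k : Nat) : Int) by push_cast; ring]
    rw [show ((u+1 : Nat) : Int) - 1 = ((u : Nat) : Int) by push_cast; ring]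
    rw [aSet_natCast, aGet_natCast, aGet_natCast, aGet_natCast]
    simp [stepIn]
  simp only [PySem.List.pyGetD_zero]
  rw [foldl_pyRange_one_shift _ _ _ _ hout]
  rw [foldl_pyRange_one_shift _ _ _ _ hrow]
  rw [foldl_pyRange_one_shift _ _ _ _ hcol]
  have h1 : aSet (List.replicate m.length (List.replicate (m.getD 0 []).length 0)) 0 0 (aGet m 0 0)
      = sset (List.replicate m.length (List.replicate (m.getD 0 []).length 0)) 0 0 (cellM m 0 0) := by
    rw [show aGet m 0 0 = cellM m 0 0 from by simpa using aGet_natCast m 0 0]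
    simpa using aSet_natCast (List.replicate m.length (List.replicate (m.getD 0 []).length 0)) 0 0 (cellM m 0 0)
  rw [h1]

theorem aGet_neg_neg (dp : List (List Int)) (nr nc : Nat) (hs : ShapeP nr nc dp)
    (hnr : 0 < nr) (hnc : 0 < nc) :
    aGet dp (-1) (-1) = cellM dp (nr-1) (nc-1) := by
  have hdne : dp ≠ [] := by
    intro h; rw [h] at hs; obtain ⟨h1, _⟩ := hs; simp at h1; omega
  unfold aGet cellM
  rw [PySem.List.pyGetD_neg_one dp [] hdne, getLast_eq_getD dp hdne [], hs.1]
  have hrne : dp.getD (nr-1) [] ≠ [] := by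
    have hl := shape_row_len hs (nr-1) (by omega)
    intro h; rw [h] at hl; simp at hl; omega
  rw [PySem.List.pyGetD_neg_one _ 0 hrne, getLast_eq_getD _ hrne 0,
    shape_row_len hs (nr-1) (by omega)]

theorem colLoop (m : List (List Int)) (nr nc : Nat) (hnc0 : 0 < nc)
    (dp : List (List Int)) (hs : ShapeP nr nc dp) (h0 : cellM dp 0 0 = refM m 0 0) :
    ∀ t, t < nr →
      ShapeP nr nc ((List.range t).foldl (stepCol m) dp) ∧
      ∀ i ≤ t, cellM ((List.range t).foldl (stepCol m) dp) i 0 = refM m i 0 := by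
  intro t
  induction t with
  | zero =>
    intro _
    refine ⟨hs, ?_⟩
    intro i hi
    interval_cases i
    simpa using h0
  | succ t ih =>
    intro ht
    obtain ⟨ihs, ihv⟩ := ih (by omega)
    rw [List.range_succ, List.foldl_append, List.foldl_cons, List.foldl_nil]
    set F := (List.range t).foldl (stepCol m) dp with hF
    constructor
    · exact shape_sset ihs _ _ _ (by omega)
    · intro i hi
      by_cases hieq : i = t + 1
      · subst hieq
        unfold stepCol
        rw [cellM_sset_self _ _ _ _ (by rw [ihs.1]; omega)
          (by rw [shape_row_len ihs (t+1) (by omega)]; omega)]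
        rw [ihv t (by omega), refM]
      · unfold stepCol
        rw [cellM_sset_ne _ _ _ _ _ _ (by omega)]
        exact ihv i (by omega)

theorem rowLoop (m : List (List Int)) (nr nc : Nat) (hnr0 : 0 < nr)
    (dp : List (List Int)) (hs : ShapeP nr nc dp)
    (hcol : ∀ i < nr, cellM dp i 0 = refM m i 0) :
    ∀ t, t < nc →
      ShapeP nr nc ((List.range t).foldl (stepRow m) dp) ∧
      (∀ i < nr, cellM ((List.range t).foldl (stepRow m) dp) i 0 = refM m i 0) ∧
      ∀ j ≤ t, cellM ((List.range t).foldl (stepRow m) dp) 0 j = refM m 0 j := by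
  intro t
  induction t with
  | zero =>
    intro _
    refine ⟨hs, hcol, ?_⟩
    intro j hj
    interval_cases j
    exact hcol 0 hnr0
  | succ t ih =>
    intro ht
    obtain ⟨ihs, ihc, ihv⟩ := ih (by omega)
    rw [List.range_succ, List.foldl_append, List.foldl_cons, List.foldl_nil]
    set F := (List.range t).foldl (stepRow m) dp with hF
    refine ⟨shape_sset ihs _ _ _ hnr0, ?_, ?_⟩
    · intro i hi
      unfold stepRow
      rw [cellM_sset_ne _ _ _ _ _ _ (by omega)]
      exact ihc i hi
    · intro j hj
      by_cases hjeq : j = t + 1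
      · subst hjeq
        unfold stepRow
        rw [cellM_sset_self _ _ _ _ (by rw [ihs.1]; omega)
          (by rw [shape_row_len ihs 0 hnr0]; omega)]
        rw [ihv t (by omega), refM]
      · unfold stepRow
        rw [cellM_sset_ne _ _ _ _ _ _ (by omega)]
        exact ihv j (by omega)

theorem innerLoop (m : List (List Int)) (nr nc : Nat) (i' : Nat)
    (hi1 : 1 ≤ i') (hi2 : i' < nr)
    (dp : List (List Int)) (hs : ShapeP nr nc dp)
    (hprev : ∀ ii < i', ∀ j < nc, cellM dp ii j = refM m ii j)
    (hcol : ∀ ii < nr, cellM dp ii 0 = refM m ii 0) :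
    ∀ t, t < nc →
      ShapeP nr nc ((List.range t).foldl (stepIn m i') dp) ∧
      (∀ ii < i', ∀ j < nc, cellM ((List.range t).foldl (stepIn m i') dp) ii j = refM m ii j) ∧
      (∀ ii < nr, cellM ((List.range t).foldl (stepIn m i') dp) ii 0 = refM m ii 0) ∧
      ∀ j ≤ t, cellM ((List.range t).foldl (stepIn m i') dp) i' j = refM m i' j := by
  intro t
  induction t with
  | zero =>
    intro _
    refine ⟨hs, hprev, hcol, ?_⟩
    intro j hj
    interval_cases j
    exact hcol i' hi2
  | succ t ih =>
    intro ht
    obtain ⟨ihs, ihp, ihc, ihv⟩ := ih (by omega)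
    rw [List.range_succ, List.foldl_append, List.foldl_cons, List.foldl_nil]
    set F := (List.range t).foldl (stepIn m i') dp with hF
    refine ⟨shape_sset ihs _ _ _ hi2, ?_, ?_, ?_⟩
    · intro ii hii j hj
      unfold stepIn
      rw [cellM_sset_ne _ _ _ _ _ _ (by omega)]
      exact ihp ii hii j hj
    · intro ii hii
      unfold stepIn
      rw [cellM_sset_ne _ _ _ _ _ _ (by omega)]
      exact ihc ii hii
    · intro j hj
      by_cases hjeq : j = t + 1
      · subst hjeq
        unfold stepIn
        rw [cellM_sset_self _ _ _ _ (by rw [ihs.1]; omega)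
          (by rw [shape_row_len ihs i' hi2]; omega)]
        rw [ihp (i'-1) (by omega) (t+1) (by omega), ihv t (by omega)]
        obtain ⟨ii, rfl⟩ : ∃ ii, i' = ii + 1 := ⟨i' - 1, by omega⟩
        rw [show ii + 1 - 1 = ii by omega, refM]
      · unfold stepIn
        rw [cellM_sset_ne _ _ _ _ _ _ (by omega)]
        exact ihv j (by omega)

theorem outerLoop (m : List (List Int)) (nr nc : Nat) (hnc0 : 0 < nc)
    (dp : List (List Int)) (hs : ShapeP nr nc dp)
    (hcol : ∀ i < nr, cellM dp i 0 = refM m i 0)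
    (hrow : ∀ j < nc, cellM dp 0 j = refM m 0 j) :
    ∀ t, t < nr →
      ShapeP nr nc ((List.range t).foldl (stepOut m nc) dp) ∧
      (∀ i < nr, cellM ((List.range t).foldl (stepOut m nc) dp) i 0 = refM m i 0) ∧
      (∀ j < nc, cellM ((List.range t).foldl (stepOut m nc) dp) 0 j = refM m 0 j) ∧
      ∀ i ≤ t, ∀ j < nc, cellM ((List.range t).foldl (stepOut m nc) dp) i j = refM m i j := by
  intro t
  induction t with
  | zero =>
    intro _
    refine ⟨hs, hcol, hrow, ?_⟩
    intro i hi j hj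
    interval_cases i
    exact hrow j hj
  | succ t ih =>
    intro ht
    obtain ⟨ihs, ihc, ihr, ihv⟩ := ih (by omega)
    rw [List.range_succ, List.foldl_append, List.foldl_cons, List.foldl_nil]
    have hinner := innerLoop m nr nc (t+1) (by omega) (by omega)
      ((List.range t).foldl (stepOut m nc) dp) ihs
      (fun ii hii j hj => ihv ii (by omega) j hj) ihc (nc-1) (by omega)
    obtain ⟨js, jp, jc, jv⟩ := hinner
    refine ⟨js, jc, fun j hj => jp 0 (by omega) j hj, ?_⟩
    intro i hi j hj
    by_cases hieq : i = t + 1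
    · subst hieq
      exact jv j (by omega)
    · exact jp i (by omega) j hj

theorem helper2_A_ref (matrix : List (List Int)) (h : Pre_helper2 matrix) :
    helper2 matrix = refM matrix (matrix.length - 1) ((matrix.getD 0 []).length - 1) := by
  obtain ⟨hne, h0, _⟩ := h
  have h0' : matrix.getD 0 [] ≠ [] := by
    cases matrix with
    | nil => exact absurd rfl hne
    | cons a b => simpa using h0
  have hnr0 : 0 < matrix.length := List.length_pos_iff.mpr hne
  have hnc0 : 0 < (matrix.getD 0 []).length := List.length_pos_iff.mpr h0'
  set nr := matrix.length with hnr
  set nc := (matrix.getD 0 []).length with hnc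
  rw [helper2_eq_nat]
  have hs0 : ShapeP nr nc (List.replicate nr (List.replicate nc 0)) := by
    refine ⟨by simp, ?_⟩
    intro row hrow
    rw [List.eq_of_mem_replicate hrow, List.length_replicate]
  have hrow0 : (List.replicate nr (List.replicate nc (0:Int))).getD 0 [] = List.replicate nc 0 := by
    rw [List.getD_eq_getElem _ _ (by simpa using hnr0), List.getElem_replicate]
  have hs1 : ShapeP nr nc (sset (List.replicate nr (List.replicate nc 0)) 0 0 (cellM matrix 0 0)) :=
    shape_sset hs0 _ _ _ hnr0
  have h1v : cellM (sset (List.replicate nr (List.replicate nc 0)) 0 0 (cellM matrix 0 0)) 0 0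
      = refM matrix 0 0 := by
    rw [cellM_sset_self _ _ _ _ (by simpa using hnr0) (by rw [hrow0, List.length_replicate]; omega)]
    rw [refM]
  obtain ⟨hs2, h2v⟩ := colLoop matrix nr nc hnc0 _ hs1 h1v (nr-1) (by omega)
  obtain ⟨hs3, h3c, h3v⟩ := rowLoop matrix nr nc hnr0 _ hs2
    (fun i hi => h2v i (by omega)) (nc-1) (by omega)
  obtain ⟨hs4, _, _, h4v⟩ := outerLoop matrix nr nc hnc0 _ hs3 h3c
    (fun j hj => h3v j (by omega)) (nr-1) (by omega)
  rw [aGet_neg_neg (natDP matrix) nr nc (by exact hs4) hnr0 hnc0]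
  exact h4v (nr-1) (by omega) (nc-1) (by omega)

-- ===== VERDICT (by name: the statement is the Claim_ definition above) =====
theorem helper2_spec : Claim_equal_helper2 := by
  intro matrix _ hpre
  unfold Spec_helper2
  rw [helper2_A_ref matrix hpre, helper2_B_ref matrix hpre]
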